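-- pv_equiv track=rewrite | github.com/RuosangShi/Thesis | data_extractor/topcons_processor.py | parse_topology_string
-- ===== SOURCE A (Python) =====
-- from typing import Dict, List, Any
--
-- def parse_topology_string(topology_line: str) -> Dict[str, str]:
--     """
--     parse the topology string to get the structure regions
--
--     Args:
--         topology_line (str): the topology prediction string
--
--     Returns:
--         Dict[str, str]: a dictionary containing the structure regions
--     """
--     result = {
--         "Signal_peptide": [],
--         "Extracellular": [],
--         "Transmembrane": [],
--         "Cytoplasmic": []
--     }
--
--     # analyze the topology string
--     current_state = None
--     start_pos = 1  # 1-based indexing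
--
--     for i, char in enumerate(topology_line):
--         if current_state is None:
--             current_state = char
--             start_pos = i + 1
--         elif char != current_state:
--             end_pos = i
--
--             if current_state == 'S':
--                 result["Signal_peptide"].append(f"{start_pos}-{end_pos}")
--             elif current_state == 'o':
--                 result["Extracellular"].append(f"{start_pos}-{end_pos}")
--             elif current_state == 'M':
--                 result["Transmembrane"].append(f"{start_pos}-{end_pos}")
--             elif current_state == 'i':
--                 result["Cytoplasmic"].append(f"{start_pos}-{end_pos}")
--
--             current_state = char
--             start_pos = end_pos + 1
--
--     # handle the last region
--     end_pos = len(topology_line)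
--     if current_state == 'S':
--         result["Signal_peptide"].append(f"{start_pos}-{end_pos}")
--     elif current_state == 'o':
--         result["Extracellular"].append(f"{start_pos}-{end_pos}")
--     elif current_state == 'M':
--         result["Transmembrane"].append(f"{start_pos}-{end_pos}")
--     elif current_state == 'i':
--         result["Cytoplasmic"].append(f"{start_pos}-{end_pos}")
--
--     return result
-- ===== SOURCE B (Python) =====
-- def parse_topology_string(topology_line: str):
--     labels = (('S', 'Signal_peptide'), ('o', 'Extracellular'),
--               ('M', 'Transmembrane'), ('i', 'Cytoplasmic'))
--     if not topology_line:
--         return {label: [] for _, label in labels}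
--     # staged passes: adjacency pairs -> cut positions & run heads -> ranges -> per-label filter
--     adj = list(zip(topology_line, topology_line[1:]))
--     cuts = [i + 1 for i, (a, b) in enumerate(adj) if a != b]
--     bounds = [0] + cuts + [len(topology_line)]
--     heads = [topology_line[0]] + [b for a, b in adj if a != b]
--     ranges = [(ch, f"{st + 1}-{en}")
--               for ch, (st, en) in zip(heads, zip(bounds, bounds[1:]))]
--     return {label: [r for ch, r in ranges if ch == c] for c, label in labels}
-- ===== Notes on version B (the rewrite author's own statement) =====
-- stated objective: alternative
-- what changed: Replaced A's single-pass current_state/start_pos state machine (mutating dict lists with a duplicated trailing flush) by staged whole-list passes: zip the string with its shift to get adjacency pairs, derive cut positions and run-head characters from them, zip heads with consecutive boundary pairs into labeled ranges, and build each category by a comprehension filter.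
import Mathlib
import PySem

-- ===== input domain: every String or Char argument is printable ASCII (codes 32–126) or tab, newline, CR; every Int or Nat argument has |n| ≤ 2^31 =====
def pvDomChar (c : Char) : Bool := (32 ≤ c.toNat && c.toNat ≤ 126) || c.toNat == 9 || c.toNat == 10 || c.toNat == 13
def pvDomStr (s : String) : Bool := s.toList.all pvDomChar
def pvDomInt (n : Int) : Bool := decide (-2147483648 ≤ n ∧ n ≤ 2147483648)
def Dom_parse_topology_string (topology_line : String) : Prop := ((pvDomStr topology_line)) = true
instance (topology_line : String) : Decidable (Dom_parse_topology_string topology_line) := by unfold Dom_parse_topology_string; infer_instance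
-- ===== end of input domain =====

-- B replaces A's one-pass state machine by staged whole-list passes (adjacency
-- pairs -> cuts/heads -> ranges -> per-label filters); objective: alternative.

-- f"{a}-{b}" (both Pythons' range f-string)
def pvFmtRange (a b : Int) : String :=
  PySem.Int.toStr a ++ "-" ++ PySem.Int.toStr b

-- ===== PORT A =====
-- result[k].append(s) on the assoc-list model of the dict (keys fixed and distinct)
def pvDictAppend (res : List (String × List String)) (k : String) (s : String) :
    List (String × List String) :=
  res.map (fun p => if p.1 = k then (p.1, p.2 ++ [s]) else p)

-- A's if/elif dispatch on current_state
def pvAppendA (res : List (String × List String)) (cur : Char) (s : String) :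
    List (String × List String) :=
  if cur = 'S' then pvDictAppend res "Signal_peptide" s
  else if cur = 'o' then pvDictAppend res "Extracellular" s
  else if cur = 'M' then pvDictAppend res "Transmembrane" s
  else if cur = 'i' then pvDictAppend res "Cytoplasmic" s
  else res

-- A's for-loop: cur = current_state, start = start_pos, i = 1-based position of the last consumed char
def pvLoopA (res : List (String × List String)) (cur : Char) (start i : Int) :
    List Char → List (String × List String)
  | [] => pvAppendA res cur (pvFmtRange start i)
  | c :: rest =>
      if c = cur then pvLoopA res cur start (i + 1) rest
      else pvLoopA (pvAppendA res cur (pvFmtRange start i)) c (i + 1) (i + 1) rest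

def parse_topology_string (topology_line : String) : List (String × List String) :=
  let init : List (String × List String) :=
    [("Signal_peptide", []), ("Extracellular", []), ("Transmembrane", []), ("Cytoplasmic", [])]
  match topology_line.toList with
  | [] => init    -- current_state stays None; the trailing if/elif chain all fails
  | c :: rest => pvLoopA init c 1 1 rest

-- ===== PORT B =====
def pvLabels : List (Char × String) :=
  [('S', "Signal_peptide"), ('o', "Extracellular"), ('M', "Transmembrane"), ('i', "Cytoplasmic")]

def parse_topology_string_alt (topology_line : String) : List (String × List String) :=
  match topology_line.toList with
  | [] => pvLabels.map (fun p => (p.2, ([] : List String)))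
  | c :: rest =>
      let adj := (c :: rest).zip rest                  -- list(zip(s, s[1:]))
      let cuts := (PySem.List.enumerate adj).filterMap
        (fun p => if p.2.1 ≠ p.2.2 then some (p.1 + 1) else none)
      let bounds : List Int := 0 :: cuts ++ [((c :: rest).length : Int)]
      let heads := c :: adj.filterMap (fun p => if p.1 ≠ p.2 then some p.2 else none)
      let ranges := (heads.zip (bounds.zip bounds.tail)).map
        (fun q => (q.1, pvFmtRange (q.2.1 + 1) q.2.2))
      pvLabels.map (fun p => (p.2, (ranges.filter (fun r => r.1 == p.1)).map Prod.snd))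

-- ===== PRECONDITION & SPEC =====
def Spec_parse_topology_string (topology_line : String) (out : List (String × List String)) : Prop := out = parse_topology_string_alt topology_line
instance (topology_line : String) (out : List (String × List String)) : Decidable (Spec_parse_topology_string topology_line out) := by unfold Spec_parse_topology_string; infer_instance

-- ===== CLAIM (what is proved, stated in full; the proofs are below) =====
def Claim_equal_parse_topology_string : Prop := ∀ (topology_line : String), Dom_parse_topology_string topology_line → Spec_parse_topology_string topology_line (parse_topology_string topology_line)

-- ===== LEMMAS AND PROOFS =====

-- the common spine: the maximal runs as (char, 1-based start, 1-based end)
def pvRuns3 (cur : Char) (start i : Int) : List Char → List (Char × Int × Int)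
  | [] => [(cur, start, i)]
  | d :: rest =>
      if d = cur then pvRuns3 cur start (i + 1) rest
      else (cur, start, i) :: pvRuns3 d (i + 1) (i + 1) rest

def pvApplyRuns (res : List (String × List String)) (rs : List (Char × Int × Int)) :
    List (String × List String) :=
  rs.foldl (fun r t => pvAppendA r t.1 (pvFmtRange t.2.1 t.2.2)) res

def pvCutsAux : List (Char × Char) → Int → List Int
  | [], _ => []
  | p :: t, j => if p.1 ≠ p.2 then j :: pvCutsAux t (j + 1) else pvCutsAux t (j + 1)

def pvSel (ch : Char) (rs : List (Char × Int × Int)) : List String :=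
  (rs.filter (fun t => t.1 == ch)).map (fun t => pvFmtRange t.2.1 t.2.2)

-- A-side: the loop is the fold of the run spine
lemma pvLoopA_eq (l : List Char) (res : List (String × List String)) (cur : Char)
    (start i : Int) :
    pvLoopA res cur start i l = pvApplyRuns res (pvRuns3 cur start i l) := by
  induction l generalizing res cur start i with
  | nil => simp [pvLoopA, pvRuns3, pvApplyRuns]
  | cons c rest ih =>
      by_cases h : c = cur
      · simp [pvLoopA, pvRuns3, h, ih]
      · simp [pvLoopA, pvRuns3, h, ih, pvApplyRuns]

lemma pvAppendA_eq (fS fo fM fi : List String) (c : Char) (s : String) :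
    pvAppendA [("Signal_peptide", fS), ("Extracellular", fo),
               ("Transmembrane", fM), ("Cytoplasmic", fi)] c s =
      [("Signal_peptide", fS ++ if c = 'S' then [s] else []),
       ("Extracellular", fo ++ if c = 'o' then [s] else []),
       ("Transmembrane", fM ++ if c = 'M' then [s] else []),
       ("Cytoplasmic", fi ++ if c = 'i' then [s] else [])] := by
  by_cases hS : c = 'S'
  · subst hS; simp [pvAppendA, pvDictAppend]
  · by_cases ho : c = 'o'
    · subst ho; simp [pvAppendA, pvDictAppend]
    · by_cases hM : c = 'M'
      · subst hM; simp [pvAppendA, pvDictAppend]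
      · by_cases hi : c = 'i'
        · subst hi; simp [pvAppendA, pvDictAppend]
        · simp [pvAppendA, hS, ho, hM, hi]

lemma pvSel_cons' (ch : Char) (t : Char × Int × Int) (rs : List (Char × Int × Int)) :
    (if t.1 = ch then [pvFmtRange t.2.1 t.2.2] else []) ++ pvSel ch rs = pvSel ch (t :: rs) := by
  by_cases h : t.1 = ch <;> simp [pvSel, h]

lemma pvApplyRuns_eq (rs : List (Char × Int × Int)) (fS fo fM fi : List String) :
    pvApplyRuns [("Signal_peptide", fS), ("Extracellular", fo),
                 ("Transmembrane", fM), ("Cytoplasmic", fi)] rs =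
      [("Signal_peptide", fS ++ pvSel 'S' rs), ("Extracellular", fo ++ pvSel 'o' rs),
       ("Transmembrane", fM ++ pvSel 'M' rs), ("Cytoplasmic", fi ++ pvSel 'i' rs)] := by
  induction rs generalizing fS fo fM fi with
  | nil => simp [pvApplyRuns, pvSel]
  | cons t rs ih =>
      simp only [pvApplyRuns, List.foldl_cons] at *
      rw [pvAppendA_eq, ih]
      simp only [List.append_assoc, pvSel_cons']

-- the port's enumerate-comprehension computes pvCutsAux
lemma pvCuts_eq (adj : List (Char × Char)) (j : Int) :
    (PySem.List.enumerate adj j).filterMap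
        (fun p => if p.2.1 ≠ p.2.2 then some (p.1 + 1) else none) = pvCutsAux adj (j + 1) := by
  induction adj generalizing j with
  | nil => simp [PySem.List.enumerate_nil, pvCutsAux]
  | cons p t ih =>
      have ih' := ih (j + 1)
      simp only [ite_not] at ih'
      by_cases h : p.1 = p.2 <;>
        simp [PySem.List.enumerate_cons, pvCutsAux, h, ih']

-- key: the staged heads/bounds construction produces exactly the run spine
lemma pvKey (t : List Char) (c : Char) (start i : Int) :
    ((c :: ((c :: t).zip t).filterMap (fun p => if p.1 ≠ p.2 then some p.2 else none)).zip
        ((((start - 1) :: pvCutsAux ((c :: t).zip t) i ++ [i + (t.length : Int)]).zip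
          (((start - 1) :: pvCutsAux ((c :: t).zip t) i ++ [i + (t.length : Int)]).tail)))).map
        (fun q => (q.1, pvFmtRange (q.2.1 + 1) q.2.2)) =
      (pvRuns3 c start i t).map (fun r => (r.1, pvFmtRange r.2.1 r.2.2)) := by
  induction t generalizing c start i with
  | nil => simp [pvCutsAux, pvRuns3]
  | cons d t' ih =>
      have elen : i + ((d :: t').length : Int) = (i + 1) + (t'.length : Int) := by
        rw [List.length_cons]; push_cast; ring
      by_cases h : d = c
      · subst h
        have := ih d start (i + 1)
        simp only [pvCutsAux, pvRuns3, List.zip_cons_cons, List.filterMap_cons,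
          ne_eq, not_true_eq_false, if_pos rfl, if_false, reduceIte, elen]
        simpa using this
      · have hne : c ≠ d := fun hcd => h hcd.symm
        have := ih d (i + 1) (i + 1)
        rw [show (i + 1) - 1 = i by ring] at this
        simp only [pvCutsAux, pvRuns3, List.zip_cons_cons, List.filterMap_cons,
          ne_eq, hne, h, not_false_eq_true, if_pos, if_neg, elen]
        simp only [List.cons_append, List.tail_cons, List.zip_cons_cons, List.map_cons]
        rw [show start - 1 + 1 = start by ring]
        exact congrArg (List.cons _) (by simpa using this)

-- filtering the mapped spine is pvSel
lemma pvFilterMap_sel (ch : Char) (rs : List (Char × Int × Int)) :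
    ((rs.map (fun r => (r.1, pvFmtRange r.2.1 r.2.2))).filter
        (fun r => r.1 == ch)).map Prod.snd = pvSel ch rs := by
  induction rs with
  | nil => simp [pvSel]
  | cons t rs ih =>
      by_cases h : t.1 = ch <;> simp [pvSel, h] at * <;> simpa [pvSel] using ih

-- ===== VERDICT (by name: the statement is the Claim_ definition above) =====
theorem parse_topology_string_spec : Claim_equal_parse_topology_string := by
  intro s _
  unfold Spec_parse_topology_string parse_topology_string parse_topology_string_alt
  cases hs : s.toList with
  | nil => rfl
  | cons c rest =>
      simp only []
      rw [pvLoopA_eq, pvApplyRuns_eq]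
      rw [pvCuts_eq ((c :: rest).zip rest) 0]
      simp only [zero_add, List.length_cons]
      push_cast
      rw [show ((rest.length : Int) + 1) = 1 + (rest.length : Int) by ring]
      have key := pvKey rest c 1 1
      rw [show (1 : Int) - 1 = 0 by ring] at key
      rw [key]
      simp [pvLabels, pvFilterMap_sel]
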